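-- pv_equiv track=rewrite | github.com/asano-lab/oasobi | rubik2.py | switchColorAct
-- ===== SOURCE A (Python) =====
-- ACT_DIC_0TO7 = {0: 7, 7: 3, 3: 4, 4: 0, 1: 6, 6: 2, 2: 5, 5: 1, 8: 8, 9: 9, 10: 10, 11: 11}
--
-- ACT_DIC_4TO8 = {4: 8, 8: 7, 7: 11, 11: 4, 5: 9, 9: 6, 6: 10, 10: 5, 0: 0, 1: 1, 2: 2, 3: 3}
--
-- def switch0to7Acts(a_list):
--     return [ACT_DIC_0TO7[a] for a in a_list]
--
-- def swith4to8Acts(a_list):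
--     return [ACT_DIC_4TO8[a] for a in a_list]
--
-- def switchColorAct(a_list_list, color):
--     # 白
--     if color == 0:
--         return a_list_list
--     a_list_list = [swith4to8Acts(a_list) for a_list in a_list_list]
--     # 青
--     if color == 5:
--         return [swith4to8Acts(a_list) for a_list in a_list_list]
--     # 赤, 黄, 橙, 緑
--     for _ in range(color - 1):
--         a_list_list = [switch0to7Acts(a_list) for a_list in a_list_list]
--     return a_list_list
-- ===== SOURCE B (Python) =====
-- ACT_DIC_0TO7 = {0: 7, 7: 3, 3: 4, 4: 0, 1: 6, 6: 2, 2: 5, 5: 1, 8: 8, 9: 9, 10: 10, 11: 11}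
--
-- ACT_DIC_4TO8 = {4: 8, 8: 7, 7: 11, 11: 4, 5: 9, 9: 6, 6: 10, 10: 5, 0: 0, 1: 1, 2: 2, 3: 3}
--
-- def switchColorAct(a_list_list, color):
--     if color == 0:
--         return a_list_list
--     # build ONE composed relabeling table, then apply it in a single pass
--     if color == 5:
--         comp = {k: ACT_DIC_4TO8[v] for k, v in ACT_DIC_4TO8.items()}
--     else:
--         comp = ACT_DIC_4TO8
--         steps = (color - 1) % 4 if color > 1 else 0  # ACT_DIC_0TO7 has order 4
--         for _ in range(steps):
--             comp = {k: ACT_DIC_0TO7[v] for k, v in comp.items()}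
--     return [[comp[a] for a in sub] for sub in a_list_list]
-- ===== Notes on version B (the rewrite author's own statement) =====
-- stated objective: faster
-- what changed: Instead of rescanning the whole nested list once per composition step (one 4to8 pass plus color-1 or a second 4to8 pass), B precomputes a single composed 12-entry relabeling table (using that ACT_DIC_0TO7 is a permutation of order 4, so only (color-1) % 4 compositions are needed) and applies it to the data in one pass.
-- outside the precondition, e.g. on switchColorAct([[12]], 1): A raises KeyError, B raises KeyError
import Mathlib
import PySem

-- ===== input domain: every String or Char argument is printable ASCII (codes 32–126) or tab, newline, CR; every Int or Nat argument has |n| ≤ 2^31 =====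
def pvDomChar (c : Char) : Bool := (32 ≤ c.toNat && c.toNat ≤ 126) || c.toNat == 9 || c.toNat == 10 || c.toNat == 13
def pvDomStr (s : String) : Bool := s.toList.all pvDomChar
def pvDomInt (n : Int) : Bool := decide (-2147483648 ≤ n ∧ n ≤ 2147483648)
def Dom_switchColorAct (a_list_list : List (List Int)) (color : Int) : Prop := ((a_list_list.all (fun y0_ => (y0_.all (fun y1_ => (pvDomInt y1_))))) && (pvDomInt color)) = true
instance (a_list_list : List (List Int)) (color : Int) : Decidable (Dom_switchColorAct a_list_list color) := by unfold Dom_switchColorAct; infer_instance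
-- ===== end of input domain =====

-- B replaces A's repeated rescans of the whole structure by one precomputed composed
-- relabeling table (ACT_DIC_0TO7 has order 4) applied in a single pass (objective: faster
-- by a constant factor when color > 1; same return value on all admitted inputs).

-- ===== PORT A =====
def actDic0to7 : PySem.Dict Int Int :=
  PySem.Dict.ofList [(0,7),(7,3),(3,4),(4,0),(1,6),(6,2),(2,5),(5,1),(8,8),(9,9),(10,10),(11,11)]

def actDic4to8 : PySem.Dict Int Int :=
  PySem.Dict.ofList [(4,8),(8,7),(7,11),(11,4),(5,9),(9,6),(6,10),(10,5),(0,0),(1,1),(2,2),(3,3)]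

-- dict lookup ACT_DIC_0TO7[a]: KeyError (key not in 0..11) is excluded by Pre_
def switch0to7Acts (a_list : List Int) : List Int :=
  a_list.map (fun a => actDic0to7.getD a 0)

def swith4to8Acts (a_list : List Int) : List Int :=
  a_list.map (fun a => actDic4to8.getD a 0)

def switchColorAct (a_list_list : List (List Int)) (color : Int) : List (List Int) :=
  if color = 0 then a_list_list
  else
    let l1 := a_list_list.map (fun a_list => swith4to8Acts a_list)
    if color = 5 then l1.map (fun a_list => swith4to8Acts a_list)
    else (PySem.List.pyRange 0 (color - 1) 1).foldl
      (fun acc _ => acc.map (fun a_list => switch0to7Acts a_list)) l1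

-- ===== PORT B =====
def switchColorAct_alt (a_list_list : List (List Int)) (color : Int) : List (List Int) :=
  if color = 0 then a_list_list
  else
    let comp : PySem.Dict Int Int :=
      if color = 5 then
        PySem.Dict.mk (actDic4to8.items.map (fun p => (p.1, actDic4to8.getD p.2 0)))
      else
        let steps : Int := if 1 < color then PySem.Int.mod (color - 1) 4 else 0
        (PySem.List.pyRange 0 steps 1).foldl
          (fun c _ => PySem.Dict.mk (c.items.map (fun p => (p.1, actDic0to7.getD p.2 0))))
          actDic4to8
    a_list_list.map (fun sub => sub.map (fun a => comp.getD a 0))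

-- ===== PRECONDITION & SPEC =====
-- Pre_ excludes exactly the inputs on which A raises KeyError: color ≠ 0 and some action
-- label outside 0..11 (both dicts have keys 0..11).
def Pre_switchColorAct (a_list_list : List (List Int)) (color : Int) : Prop :=
  color = 0 ∨ ∀ l ∈ a_list_list, ∀ a ∈ l, 0 ≤ a ∧ a < 12
instance (a_list_list : List (List Int)) (color : Int) : Decidable (Pre_switchColorAct a_list_list color) := by
  unfold Pre_switchColorAct; infer_instance

def pvWitness_switchColorAct : List (List Int) × Int := ([[0, 5, 11], [7]], 3)

def Spec_switchColorAct (a_list_list : List (List Int)) (color : Int) (out : List (List Int)) : Prop := out = switchColorAct_alt a_list_list color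
instance (a_list_list : List (List Int)) (color : Int) (out : List (List Int)) : Decidable (Spec_switchColorAct a_list_list color out) := by unfold Spec_switchColorAct; infer_instance

-- ===== CLAIM (what is proved, stated in full; the proofs are below) =====
def Claim_equal_switchColorAct : Prop := ∀ (a_list_list : List (List Int)) (color : Int), Dom_switchColorAct a_list_list color → Pre_switchColorAct a_list_list color → Spec_switchColorAct a_list_list color (switchColorAct a_list_list color)

-- ===== LEMMAS AND PROOFS =====

-- a fold that ignores the list elements is an iterate of its step function
theorem foldl_const_iterate {α β : Type} (g : α → α) (xs : List β) (init : α) :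
    xs.foldl (fun acc _ => g acc) init = g^[xs.length] init := by
  induction xs generalizing init with
  | nil => rfl
  | cons x xs ih => simpa [Function.iterate_succ_apply] using ih (g init)

-- iterating "map (map f)" is "map (map f^[n])"
theorem iterate_mapmap {α : Type} (f : α → α) (n : Nat) (L : List (List α)) :
    (fun M : List (List α) => M.map (fun l => l.map f))^[n] L
      = L.map (fun l => l.map f^[n]) := by
  induction n generalizing L with
  | zero => simp
  | succ n ih =>
    rw [Function.iterate_succ_apply, ih, List.map_map]
    apply List.map_congr_left
    intro l _
    rw [Function.comp_apply, List.map_map]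
    apply List.map_congr_left
    intro a _
    exact (Function.iterate_succ_apply f n a).symm

-- A's whole relabeling loop, in one statement matching the port's fold
theorem foldl_map_iterate (f : Int → Int) (xs : List Int) (L : List (List Int)) :
    xs.foldl (fun acc _ => acc.map (fun l => l.map f)) L
      = L.map (fun l => l.map f^[xs.length]) := by
  rw [foldl_const_iterate (fun M : List (List Int) => M.map (fun l => l.map f)) xs L,
    iterate_mapmap]

def f07 (x : Int) : Int := actDic0to7.getD x 0
def f48 (x : Int) : Int := actDic4to8.getD x 0

theorem f48_range (a : Int) (h1 : 0 ≤ a) (h2 : a < 12) : 0 ≤ f48 a ∧ f48 a < 12 := by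
  interval_cases a <;> decide

theorem f07_iter4 (a : Int) (h1 : 0 ≤ a) (h2 : a < 12) : f07^[4] a = a := by
  interval_cases a <;> decide

theorem f07_period (n : Nat) (a : Int) (h1 : 0 ≤ a) (h2 : a < 12) :
    f07^[n] a = f07^[n % 4] a := by
  induction n using Nat.strong_induction_on with
  | _ n ih =>
    by_cases h : n < 4
    · rw [Nat.mod_eq_of_lt h]
    · have hn : f07^[n] a = f07^[(n - 4) + 4] a := by rw [show (n - 4) + 4 = n by omega]
      rw [hn, Function.iterate_add_apply, f07_iter4 a h1 h2, ih (n - 4) (by omega),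
        show (n - 4) % 4 = n % 4 by omega]

-- the core pointwise fact: A's per-element relabeling equals B's composed-table lookup
theorem key_pointwise (color a : Int) (ha1 : 0 ≤ a) (ha2 : a < 12) :
    f07^[(color - 1).toNat] (f48 a)
      = ((PySem.List.pyRange 0 (if 1 < color then PySem.Int.mod (color - 1) 4 else 0) 1).foldl
          (fun c _ => PySem.Dict.mk (c.items.map (fun p => (p.1, actDic0to7.getD p.2 0))))
          actDic4to8).getD a 0 := by
  have hs : (if 1 < color then PySem.Int.mod (color - 1) 4 else 0)
      = (((color - 1).toNat % 4 : Nat) : Int) := by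
    split_ifs with h
    · have hc : color - 1 = (((color - 1).toNat : Nat) : Int) := by omega
      rw [hc, show ((4 : Int)) = ((4 : Nat) : Int) from rfl, PySem.Int.mod_natCast]
      simp
    · omega
  rw [hs]
  have hb := f48_range a ha1 ha2
  rw [f07_period _ _ hb.1 hb.2]
  have h4 : (color - 1).toNat % 4 < 4 := Nat.mod_lt _ (by omega)
  set r := (color - 1).toNat % 4 with hr
  clear_value r
  interval_cases r <;> interval_cases a <;> decide

-- ===== VERDICT (by name: the statement is the Claim_ definition above) =====
theorem switchColorAct_spec : Claim_equal_switchColorAct := by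
  intro L color _hdom hpre
  unfold Spec_switchColorAct
  by_cases h0 : color = 0
  · simp [switchColorAct, switchColorAct_alt, h0]
  · have hmem : ∀ l ∈ L, ∀ a ∈ l, 0 ≤ a ∧ a < 12 := by
      rcases hpre with h | h
      · exact absurd h h0
      · exact h
    by_cases h5 : color = 5
    · subst h5
      simp only [switchColorAct, switchColorAct_alt,
        show ((5 : Int) = 0) = False by simp, if_false, swith4to8Acts, List.map_map]
      apply List.map_congr_left
      intro l hl
      rw [Function.comp_apply, List.map_map]
      apply List.map_congr_left
      intro a hal
      obtain ⟨ha1, ha2⟩ := hmem l hl a hal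
      rw [Function.comp_apply]
      show f48 (f48 a) = _
      interval_cases a <;> decide
    · simp only [switchColorAct, switchColorAct_alt, if_neg h0, if_neg h5,
        swith4to8Acts, switch0to7Acts]
      rw [foldl_map_iterate, PySem.List.length_pyRange_one]
      simp only [List.map_map, Int.sub_zero]
      apply List.map_congr_left
      intro l hl
      rw [Function.comp_apply, List.map_map]
      apply List.map_congr_left
      intro a hal
      obtain ⟨ha1, ha2⟩ := hmem l hl a hal
      rw [Function.comp_apply]
      exact key_pointwise color a ha1 ha2
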